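-- pv_equiv track=rewrite | github.com/vrthra/pymimid | src/simplify.py | simplify_grammar
-- ===== SOURCE A (Python) =====
-- def is_method(token):
--     return True
--
-- def token_to_regex(grammar, token):
--     if token not in grammar:
--         return token
--     definition = grammar[token]
--     if ':while_' in token:
--         return "%s*" % alts_to_regex(grammar, definition)
--     elif ':if_' in token:
--         return alts_to_regex(grammar, definition)
--     elif is_method(token):
--         return token
--
-- def rule_to_regex(grammar, rule):
--     return "".join([token_to_regex(grammar, r) for r in rule])
--
-- def alts_to_regex(grammar, alts):
--     return "|".join(sorted([rule_to_regex(grammar, a) for a in alts]))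
--
-- def simplify_grammar(grammar):
--     new_grammar = {}
--     for k in grammar:
--         alts = grammar[k]
--         new_alts = []
--         for rule in alts:
--             seen = {}
--             new_rule = []
--             for token in rule:
--                 regex = token_to_regex(grammar, token)
--                 if regex in seen:
--                     new_token = seen[regex]
--                     new_rule.append(new_token)
--                 else:
--                     seen[regex] = token
--                     new_rule.append(token)
--             new_alts.append(new_rule)
--         new_grammar[k] = new_alts
--     return new_grammar
-- ===== SOURCE B (Python) =====
-- def is_method(token):
--     return True
--
-- def token_to_regex(grammar, token):
--     if token not in grammar:
--         return token
--     definition = grammar[token]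
--     if ':while_' in token:
--         return "%s*" % alts_to_regex(grammar, definition)
--     elif ':if_' in token:
--         return alts_to_regex(grammar, definition)
--     elif is_method(token):
--         return token
--
-- def rule_to_regex(grammar, rule):
--     return "".join([token_to_regex(grammar, r) for r in rule])
--
-- def alts_to_regex(grammar, alts):
--     return "|".join(sorted([rule_to_regex(grammar, a) for a in alts]))
--
-- def simplify_grammar(grammar):
--     # Phase 1: expand each DISTINCT token's regex exactly once (memo table).
--     table = {}
--     for alts in grammar.values():
--         for rule in alts:
--             for token in rule:
--                 if token not in table:
--                     table[token] = token_to_regex(grammar, token)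
--     # Phase 2: per rule, map each regex to its first-occurring token, then rewrite.
--     def rewrite(rule):
--         first = {}
--         for token in rule:
--             first.setdefault(table[token], token)
--         return [first[table[token]] for token in rule]
--     return {k: [rewrite(rule) for rule in alts] for k, alts in grammar.items()}
-- ===== Notes on version B (the rewrite author's own statement) =====
-- stated objective: alternative
-- what changed: B precomputes a memo table mapping each distinct token to its expanded regex in one pass (token_to_regex runs once per distinct token instead of once per occurrence, avoiding A's repeated re-expansion), then dedups each rule by building a regex-to-first-token dict and mapping the rule through it, instead of A's incremental seen-dict with re-expansion at every occurrence.
import Mathlib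
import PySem

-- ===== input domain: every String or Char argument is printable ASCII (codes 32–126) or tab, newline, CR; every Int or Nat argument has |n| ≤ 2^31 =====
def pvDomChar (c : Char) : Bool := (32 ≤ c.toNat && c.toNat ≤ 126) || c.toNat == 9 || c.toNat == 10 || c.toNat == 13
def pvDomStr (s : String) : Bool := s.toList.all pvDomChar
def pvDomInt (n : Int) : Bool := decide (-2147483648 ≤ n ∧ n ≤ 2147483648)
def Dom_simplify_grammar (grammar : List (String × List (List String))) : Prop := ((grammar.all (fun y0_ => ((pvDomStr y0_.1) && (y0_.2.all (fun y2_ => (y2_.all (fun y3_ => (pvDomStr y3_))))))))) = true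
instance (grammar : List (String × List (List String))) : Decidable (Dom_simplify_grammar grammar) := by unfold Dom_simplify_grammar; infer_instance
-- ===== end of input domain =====

-- B memoizes token_to_regex (one expansion per DISTINCT token, then per-rule dedup via a
-- regex→first-token dict) instead of A's re-expansion at every token occurrence; same return
-- value on every grammar on which A returns (cyclic ':while_'/':if_' grammars, where Python
-- hits RecursionError, are outside Pre_).

-- ===== PORT A =====
-- shared helpers: is_method / token_to_regex / rule_to_regex / alts_to_regex are IDENTICAL
-- module-level helpers in Source A and Source B, so they are ported once and used by both ports.
-- The mutual Python recursion is fueled; fuel (grammar.length + 1) covers every grammar on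
-- which Python terminates (an acyclic special-key path never repeats a key); `none` = the
-- RecursionError of a cyclic grammar, excluded by Pre_.

def pyIsMethod (_t : String) : Bool := true

def pySpecialWhile (t : String) : Bool := PySem.Str.isIn ":while_" t

def pySpecialIf (t : String) : Bool := PySem.Str.isIn ":if_" t

def tokenToRegex (d : PySem.Dict String (List (List String))) : Nat → String → Option String
  | 0, _ => none
  | fuel + 1, tok =>
    match d.get? tok with
    | none => some tok
    | some defn =>
      if pySpecialWhile tok then
        (altsToRegex d fuel defn).map (fun s => s ++ "*")
      else if pySpecialIf tok then
        altsToRegex d fuel defn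
      else if pyIsMethod tok then some tok
      else none
where
  ruleToRegex (d : PySem.Dict String (List (List String))) (fuel : Nat) (rule : List String) :
      Option String :=
    (rule.mapM (tokenToRegex d fuel)).map (fun rs => PySem.Str.join "" rs)
  altsToRegex (d : PySem.Dict String (List (List String))) (fuel : Nat)
      (alts : List (List String)) : Option String :=
    (alts.mapM (ruleToRegex d fuel)).map
      (fun rs => PySem.Str.join "|" (PySem.List.sorted rs (fun x => x) false))

-- the top-level call site: Python never sees None under Pre_; "!" is the fuel-out placeholder
def regexOf (d : PySem.Dict String (List (List String))) (fuel : Nat) (tok : String) : String :=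
  (tokenToRegex d fuel tok).getD "!"

def simplify_grammar (grammar : List (String × List (List String))) :
    List (String × List (List String)) :=
  let d : PySem.Dict String (List (List String)) := PySem.Dict.mk grammar
  let fuel := grammar.length + 1
  grammar.foldl
    (fun acc p =>
      let newAlts := p.2.foldl
        (fun alts rule =>
          let res := rule.foldl
            (fun (st : PySem.Dict String String × List String) tok =>
              let regex := regexOf d fuel tok
              if st.1.contains regex then (st.1, st.2 ++ [st.1.getD regex tok])
              else (st.1.insert regex tok, st.2 ++ [tok]))
            (PySem.Dict.empty, [])
          alts ++ [res.2])
        []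
      acc ++ [(p.1, newAlts)])
    []

-- ===== PORT B =====
def simplify_grammar_alt (grammar : List (String × List (List String))) :
    List (String × List (List String)) :=
  let d : PySem.Dict String (List (List String)) := PySem.Dict.mk grammar
  let fuel := grammar.length + 1
  -- Phase 1: memo table, one token_to_regex call per distinct token
  let table : PySem.Dict String String :=
    grammar.foldl
      (fun tb p =>
        p.2.foldl
          (fun tb rule =>
            rule.foldl
              (fun tb tok =>
                if tb.contains tok then tb else tb.insert tok (regexOf d fuel tok))
              tb)
          tb)
      PySem.Dict.empty
  -- Phase 2: per rule, regex → first-occurring token, then rewrite the rule through it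
  grammar.map (fun p => (p.1,
    p.2.map (fun rule =>
      let first : PySem.Dict String String :=
        rule.foldl (fun fd tok => fd.setdefault (table.getD tok "!") tok) PySem.Dict.empty
      rule.map (fun tok => first.getD (table.getD tok "!") tok))))

-- ===== PRECONDITION & SPEC =====
-- Pre_ excludes exactly the grammars whose ':while_'/':if_' expansion graph has a cycle:
-- there Python A (and B) dies with RecursionError instead of returning.
def pvNbrs (d : PySem.Dict String (List (List String))) (k : String) : List String :=
  (((d.get? k).getD []).flatten).filter
    (fun t => (pySpecialWhile t || pySpecialIf t) && (d.get? t).isSome)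

def pvReach (d : PySem.Dict String (List (List String))) : Nat → List String → List String
  | 0, s => s
  | n + 1, s => pvReach d n (PySem.Set.ofList (s ++ s.flatMap (pvNbrs d)))

def Pre_simplify_grammar (grammar : List (String × List (List String))) : Prop :=
  ∀ p ∈ grammar, (pySpecialWhile p.1 || pySpecialIf p.1) = true →
    p.1 ∉ pvReach (PySem.Dict.mk grammar) grammar.length
            (pvNbrs (PySem.Dict.mk grammar) p.1)

instance (grammar : List (String × List (List String))) :
    Decidable (Pre_simplify_grammar grammar) := by unfold Pre_simplify_grammar; infer_instance

def pvWitness_simplify_grammar : (List (String × List (List String))) :=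
  [("a", [["b", "c", "b"], ["c"]]), ("b", [[]])]

def Spec_simplify_grammar (grammar : List (String × List (List String)))
    (out : List (String × List (List String))) : Prop := out = simplify_grammar_alt grammar

instance (grammar : List (String × List (List String)))
    (out : List (String × List (List String))) :
    Decidable (Spec_simplify_grammar grammar out) := by unfold Spec_simplify_grammar; infer_instance

-- ===== CLAIM =====
def Claim_equal_simplify_grammar : Prop :=
  ∀ (grammar : List (String × List (List String))), Dom_simplify_grammar grammar →
    Pre_simplify_grammar grammar →
      Spec_simplify_grammar grammar (simplify_grammar grammar)

-- ===== LEMMAS AND PROOFS =====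

-- setdefault fold: an already-present key keeps its value
theorem pv_sd_getD (rule : List String) (f : String → String)
    (fd : PySem.Dict String String) (k : String) (x : String) (h : fd.contains k = true) :
    (rule.foldl (fun fd t => fd.setdefault (f t) t) fd).getD k x = fd.getD k x := by
  induction rule generalizing fd with
  | nil => rfl
  | cons t rest ih =>
    simp only [List.foldl_cons]
    by_cases hc : fd.contains (f t) = true
    · rw [PySem.Dict.setdefault_of_contains _ _ hc]; exact ih fd h
    · rw [PySem.Dict.setdefault_of_not_contains _ _ (by simpa using hc)]
      have hk : fd.contains (f t) = true → False := by simp [hc]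
      have hne : k ≠ f t := by rintro rfl; exact hk h
      rw [ih _ (by rw [PySem.Dict.contains_insert]; simp [h])]
      exact PySem.Dict.getD_insert_of_ne _ _ _ hne

-- A's incremental seen-dict dedup = rewrite through the full-rule first-occurrence dict
theorem pv_dedup_eq (rule : List String) (f : String → String)
    (seen : PySem.Dict String String) (out : List String) :
    (rule.foldl (fun (st : PySem.Dict String String × List String) tok =>
        if st.1.contains (f tok) then (st.1, st.2 ++ [st.1.getD (f tok) tok])
        else (st.1.insert (f tok) tok, st.2 ++ [tok])) (seen, out)).2
      = out ++ rule.map (fun t =>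
          (rule.foldl (fun fd u => fd.setdefault (f u) u) seen).getD (f t) t) := by
  induction rule generalizing seen out with
  | nil => simp
  | cons t rest ih =>
    simp only [List.foldl_cons, List.map_cons]
    by_cases hc : seen.contains (f t) = true
    · rw [if_pos hc, PySem.Dict.setdefault_of_contains _ _ hc, ih seen _,
        pv_sd_getD rest f seen (f t) t hc]
      simp
    · rw [if_neg (by simp [hc]), PySem.Dict.setdefault_of_not_contains _ _ (by simpa using hc),
        ih _ _]
      have h1 : ((seen.insert (f t) t).contains (f t)) = true := by
        rw [PySem.Dict.contains_insert]; simp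
      rw [pv_sd_getD rest f _ (f t) t h1, PySem.Dict.getD_insert_self]
      simp

-- memo fold: every contained key holds f of itself
theorem pv_memo_getD (l : List String) (f : String → String)
    (tb : PySem.Dict String String)
    (hinv : ∀ k, tb.contains k = true → tb.getD k "!" = f k) :
    ∀ k, (l.foldl (fun tb tok => if tb.contains tok then tb else tb.insert tok (f tok)) tb).contains k = true →
      (l.foldl (fun tb tok => if tb.contains tok then tb else tb.insert tok (f tok)) tb).getD k "!" = f k := by
  induction l generalizing tb with
  | nil => exact hinv
  | cons t rest ih =>
    simp only [List.foldl_cons]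
    by_cases hc : tb.contains t = true
    · rw [if_pos hc]; exact ih tb hinv
    · rw [if_neg (by simp [hc])]
      apply ih
      intro k hk
      by_cases hkt : k = t
      · subst hkt; rw [PySem.Dict.getD_insert_self]
      · rw [PySem.Dict.getD_insert_of_ne _ _ _ hkt]
        apply hinv
        rw [PySem.Dict.contains_insert] at hk
        simpa [hkt] using hk

-- memo fold: every processed token ends up contained
theorem pv_memo_contains (l : List String) (f : String → String)
    (tb : PySem.Dict String String) :
    ∀ k, (tb.contains k = true ∨ k ∈ l) →
      (l.foldl (fun tb tok => if tb.contains tok then tb else tb.insert tok (f tok)) tb).contains k = true := by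
  induction l generalizing tb with
  | nil =>
    rintro k (h | h)
    · exact h
    · cases h
  | cons t rest ih =>
    rintro k hk
    simp only [List.foldl_cons]
    by_cases hc : tb.contains t = true
    · rw [if_pos hc]
      apply ih
      rcases hk with h | h
      · exact Or.inl h
      · rcases List.mem_cons.mp h with rfl | h
        · exact Or.inl hc
        · exact Or.inr h
    · rw [if_neg (by simp [hc])]
      apply ih
      rcases hk with h | h
      · refine Or.inl ?_
        rw [PySem.Dict.contains_insert]; simp [h]
      · rcases List.mem_cons.mp h with rfl | h
        · refine Or.inl ?_
          rw [PySem.Dict.contains_insert]; simp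
        · exact Or.inr h

theorem pv_main_eq (grammar : List (String × List (List String))) :
    simplify_grammar grammar = simplify_grammar_alt grammar := by
  unfold simplify_grammar simplify_grammar_alt
  simp only []
  set d : PySem.Dict String (List (List String)) := PySem.Dict.mk grammar with hd
  set fuel := grammar.length + 1 with hfuel
  -- name the memo table and characterise it
  set table : PySem.Dict String String :=
    grammar.foldl
      (fun tb p =>
        p.2.foldl
          (fun tb rule =>
            rule.foldl
              (fun tb tok =>
                if tb.contains tok then tb else tb.insert tok (regexOf d fuel tok))
              tb)
          tb)
      PySem.Dict.empty with htable
  have hflat : table =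
      ((grammar.map Prod.snd).flatten.flatten).foldl
        (fun tb tok => if tb.contains tok then tb else tb.insert tok (regexOf d fuel tok))
        PySem.Dict.empty := by
    rw [htable, ← List.foldl_map (f := Prod.snd), ← List.foldl_flatten, ← List.foldl_flatten]
  have htab : ∀ tok ∈ (grammar.map Prod.snd).flatten.flatten,
      table.getD tok "!" = regexOf d fuel tok := by
    intro tok htok
    rw [hflat]
    apply pv_memo_getD _ _ _ (fun k hk => by simp [PySem.Dict.contains_empty] at hk)
    exact pv_memo_contains _ _ _ _ (Or.inr htok)
  rw [PySem.List.foldl_append_singleton_eq_map, List.nil_append]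
  apply List.map_congr_left
  intro p hp
  apply congrArg (Prod.mk p.1)
  rw [PySem.List.foldl_append_singleton_eq_map, List.nil_append]
  apply List.map_congr_left
  intro rule hr
  have hmem : ∀ t ∈ rule, t ∈ (grammar.map Prod.snd).flatten.flatten := by
    intro t ht
    simp only [List.mem_flatten, List.mem_map]
    exact ⟨rule, ⟨p.2, ⟨p, hp, rfl⟩, hr⟩, ht⟩
  rw [pv_dedup_eq rule (regexOf d fuel) PySem.Dict.empty [], List.nil_append]
  have hfold : rule.foldl (fun fd tok => fd.setdefault (table.getD tok "!") tok) PySem.Dict.empty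
      = rule.foldl (fun fd u => fd.setdefault (regexOf d fuel u) u) PySem.Dict.empty :=
    PySem.List.foldl_congr_mem _ _ _ _ (fun acc u hu => by rw [htab u (hmem u hu)])
  apply List.map_congr_left
  intro t ht
  rw [hfold, htab t (hmem t ht)]


-- ===== VERDICT =====
theorem simplify_grammar_spec : Claim_equal_simplify_grammar := by
  intro grammar _ _
  unfold Spec_simplify_grammar
  exact pv_main_eq grammar
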